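-- pv_equiv track=rewrite | github.com/treecubed/AdventOfCode | 2021/Day 12/Day12.py | can_revisit
-- ===== SOURCE A (Python) =====
-- def can_revisit(path):
-- 	for cave in set(path):
-- 		match cave:
-- 			case 'start', 'end':
-- 				continue
-- 			case _ if cave.islower():
-- 				if path.count(cave) > 1:
-- 					return False
-- 	return True
-- ===== SOURCE B (Python) =====
-- def can_revisit(path):
--     small = sorted(c for c in path if c.islower())
--     for a, b in zip(small, small[1:]):
--         if a == b:
--             return False
--     return True
-- ===== Notes on version B (the rewrite author's own statement) =====
-- stated objective: alternative
-- what changed: B collects the lowercase caves, sorts them once and scans adjacent pairs for a duplicate, replacing A's per-distinct-cave path.count scans.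
import Mathlib
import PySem

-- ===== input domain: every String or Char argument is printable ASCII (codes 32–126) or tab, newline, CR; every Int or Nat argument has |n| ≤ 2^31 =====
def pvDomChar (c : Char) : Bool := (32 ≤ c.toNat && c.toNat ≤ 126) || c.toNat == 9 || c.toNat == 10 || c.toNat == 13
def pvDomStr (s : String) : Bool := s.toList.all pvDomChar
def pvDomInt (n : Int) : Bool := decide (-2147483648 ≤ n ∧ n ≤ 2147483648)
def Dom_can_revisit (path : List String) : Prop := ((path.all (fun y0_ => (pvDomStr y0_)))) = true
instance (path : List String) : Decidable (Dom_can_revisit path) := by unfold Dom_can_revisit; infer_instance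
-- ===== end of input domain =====

-- B replaces A's per-distinct-cave path.count scans by sort-the-lowercase-caves and one adjacent-pair scan (alternative algorithm).

-- str.islower(): at least one cased character and no uppercase cased character; exact on the
-- printable-ASCII domain, where the cased characters are exactly the letters.
def pyStrIslower (s : String) : Bool :=
  s.toList.any (fun c => PySem.Chars.islower c || PySem.Chars.isupper c) &&
  s.toList.all (fun c => !PySem.Chars.isupper c)

-- ===== PORT A =====
-- the 'for cave in set(path)' loop; the match's first case `case 'start','end':` is a sequence
-- pattern that never matches a str, so only the `case _ if cave.islower():` guard remains live
def canRevisitLoop (path : List String) : List String → Bool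
  | [] => true
  | c :: rest =>
      if pyStrIslower c then
        if path.count c > 1 then false else canRevisitLoop path rest
      else canRevisitLoop path rest

def can_revisit (path : List String) : Bool :=
  canRevisitLoop path (PySem.Set.ofList path)

-- ===== PORT B =====
-- the zip(small, small[1:]) scan of Source B
def adjacentDistinct : List String → Bool
  | [] => true
  | [_] => true
  | a :: b :: rest => if a == b then false else adjacentDistinct (b :: rest)

def can_revisit_alt (path : List String) : Bool :=
  adjacentDistinct (PySem.List.sorted (path.filter pyStrIslower) (fun x => x) false)

-- ===== PRECONDITION & SPEC =====
def Spec_can_revisit (path : List String) (out : Bool) : Prop := out = can_revisit_alt path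
instance (path : List String) (out : Bool) : Decidable (Spec_can_revisit path out) := by unfold Spec_can_revisit; infer_instance

-- ===== CLAIM (what is proved, stated in full; the proofs are below) =====
def Claim_equal_can_revisit : Prop := ∀ (path : List String), Dom_can_revisit path → Spec_can_revisit path (can_revisit path)

-- ===== LEMMAS AND PROOFS =====

theorem canRevisitLoop_eq_all (path : List String) (l : List String) :
    canRevisitLoop path l = l.all (fun c => !(pyStrIslower c && path.count c > 1)) := by
  induction l with
  | nil => rfl
  | cons c rest ih =>
      simp only [canRevisitLoop, List.all_cons, ih]
      by_cases h : pyStrIslower c = true <;> by_cases h2 : path.count c > 1 <;>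
        simp [h, h2]

theorem adjacentDistinct_iff_chain (l : List String) :
    adjacentDistinct l = true ↔ l.IsChain (· ≠ ·) := by
  induction l with
  | nil => simp [adjacentDistinct]
  | cons a t ih =>
      cases t with
      | nil => simp [adjacentDistinct]
      | cons b rest =>
          by_cases h : a = b
          · simp [adjacentDistinct, h, List.isChain_cons_cons]
          · simp only [adjacentDistinct, beq_iff_eq, if_neg h, ih, List.isChain_cons_cons]
            tauto

theorem isChain_and {α : Type} {R S : α → α → Prop} {l : List α}
    (hR : l.IsChain R) (hS : l.IsChain S) : l.IsChain (fun a b => R a b ∧ S a b) := by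
  rw [List.isChain_iff_getElem] at *
  exact fun i h => ⟨hR i h, hS i h⟩

theorem nodup_iff_adj_of_sorted (l : List String)
    (hs : l.Pairwise (· ≤ ·)) : l.Nodup ↔ l.IsChain (· ≠ ·) := by
  constructor
  · intro h; exact List.Pairwise.isChain h
  · intro h
    have hlt : l.IsChain (· < ·) :=
      (isChain_and (List.Pairwise.isChain hs) h).imp
        (fun a b hab => lt_of_le_of_ne hab.1 hab.2)
    exact (List.isChain_iff_pairwise.1 hlt).imp (fun h => ne_of_lt h)

theorem alt_iff (path : List String) :
    can_revisit_alt path = true ↔ (path.filter pyStrIslower).Nodup := by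
  unfold can_revisit_alt
  rw [adjacentDistinct_iff_chain]
  rw [← nodup_iff_adj_of_sorted _ (PySem.List.sorted_pairwise _ _)]
  exact List.Perm.nodup_iff (PySem.List.sorted_perm _ _ _)

theorem a_iff (path : List String) :
    can_revisit path = true ↔ ∀ c ∈ path, pyStrIslower c = true → path.count c ≤ 1 := by
  unfold can_revisit
  rw [canRevisitLoop_eq_all, List.all_eq_true]
  constructor
  · intro h c hc hl
    have := h c ((PySem.Set.mem_ofList _ _).2 hc)
    simp only [hl, Bool.true_and, Bool.not_eq_eq_eq_not, Bool.not_true,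
      decide_eq_false_iff_not] at this
    omega
  · intro h c hc
    have hc' := (PySem.Set.mem_ofList _ _).1 hc
    by_cases hl : pyStrIslower c = true
    · have := h c hc' hl
      simp only [hl, Bool.true_and, Bool.not_eq_eq_eq_not, Bool.not_true,
        decide_eq_false_iff_not]
      omega
    · simp [Bool.not_eq_true] at hl
      simp [hl]

theorem filter_nodup_iff (path : List String) :
    (path.filter pyStrIslower).Nodup ↔
      ∀ c ∈ path, pyStrIslower c = true → path.count c ≤ 1 := by
  rw [List.nodup_iff_count_le_one]
  constructor
  · intro h c hc hl
    have := h c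
    rwa [List.count_filter hl] at this
  · intro h c
    by_cases hl : pyStrIslower c = true
    · rw [List.count_filter hl]
      by_cases hc : c ∈ path
      · exact h c hc hl
      · simp [List.count_eq_zero_of_not_mem hc]
    · have : c ∉ path.filter pyStrIslower := by
        simp [List.mem_filter, hl]
      simp [List.count_eq_zero_of_not_mem this]

-- ===== VERDICT (by name: the statement is the Claim_ definition above) =====
theorem can_revisit_spec : Claim_equal_can_revisit := by
  intro path _
  unfold Spec_can_revisit
  rw [Bool.eq_iff_iff, a_iff, alt_iff, filter_nodup_iff]
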